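-- pv_equiv track=rewrite | github.com/isaacnikon/zo-server | scripts/report-map-npcs.py | resolve_scene
-- ===== SOURCE A (Python) =====
-- def resolve_scene(scenes: dict, query: str | None) -> dict:
--     if not query:
--         query = "112"
--
--     if query in scenes:
--         return scenes[query]
--
--     try:
--         numeric = int(query)
--         if str(numeric) in scenes:
--             return scenes[str(numeric)]
--     except ValueError:
--         pass
--
--     lowered = query.lower()
--     for scene in scenes.values():
--         if str(scene.get("name", "")).lower() == lowered:
--             return scene
--
--     for scene in scenes.values():
--         if lowered in str(scene.get("name", "")).lower():
--             return scene
--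
--     raise SystemExit(f"scene not found: {query}")
-- ===== SOURCE B (Python) =====
-- def resolve_scene(scenes: dict, query: str | None) -> dict:
--     if not query:
--         query = "112"
--
--     if query in scenes:
--         return scenes[query]
--
--     try:
--         numeric = str(int(query))
--         if numeric in scenes:
--             return scenes[numeric]
--     except ValueError:
--         pass
--
--     lowered = query.lower()
--     candidate = None
--     for scene in scenes.values():
--         name = str(scene.get("name", "")).lower()
--         if name == lowered:
--             return scene
--         if candidate is None and lowered in name:
--             candidate = scene
--     if candidate is not None:
--         return candidate
--
--     raise SystemExit(f"scene not found: {query}")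
-- ===== Notes on version B (the rewrite author's own statement) =====
-- stated objective: alternative
-- what changed: The two separate scans over scenes.values() (exact lowercase name, then substring) are merged into a single loop that returns immediately on an exact match and records the first substring candidate for the fallback.
import Mathlib
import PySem

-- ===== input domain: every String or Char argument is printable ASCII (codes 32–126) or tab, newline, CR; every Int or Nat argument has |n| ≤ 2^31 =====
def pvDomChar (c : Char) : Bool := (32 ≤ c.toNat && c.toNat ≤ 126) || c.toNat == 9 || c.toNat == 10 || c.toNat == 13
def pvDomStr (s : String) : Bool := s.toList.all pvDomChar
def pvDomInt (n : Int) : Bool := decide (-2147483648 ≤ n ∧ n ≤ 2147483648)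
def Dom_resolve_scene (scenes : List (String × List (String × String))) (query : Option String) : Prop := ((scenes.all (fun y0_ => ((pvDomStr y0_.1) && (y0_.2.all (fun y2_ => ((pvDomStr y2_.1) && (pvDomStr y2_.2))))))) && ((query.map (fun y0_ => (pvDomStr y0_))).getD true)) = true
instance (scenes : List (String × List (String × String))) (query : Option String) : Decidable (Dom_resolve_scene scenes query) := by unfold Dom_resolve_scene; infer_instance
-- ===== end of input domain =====

-- B merges A's two scans over scenes.values() into one loop (early return on exact
-- case-insensitive name match, first substring match kept as fallback candidate).

-- shared helpers (exact under the dict → assoc-list convention)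
def pvQuery (query : Option String) : String :=
  match query with
  | none => "112"
  | some s => if s == "" then "112" else s

def pvName (sc : List (String × String)) : String :=
  (PySem.Dict.ofList sc).getD "name" ""

def pvItems (sc : List (String × String)) : List (String × String) :=
  (PySem.Dict.ofList sc).items

-- ===== PORT A =====
def resolve_scene (scenes : List (String × List (String × String))) (query : Option String) : List (String × String) :=
  let q := pvQuery query
  let d := PySem.Dict.ofList scenes
  match d.get? q with
  | some sc => pvItems sc
  | none =>
    match (match PySem.Int.ofStr? q with
           | some numeric => d.get? (PySem.Int.toStr numeric)
           | none => none) with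
    | some sc => pvItems sc
    | none =>
      let lowered := PySem.Str.lower q
      match d.values.find? (fun sc => PySem.Str.lower (pvName sc) == lowered) with
      | some sc => pvItems sc
      | none =>
        match d.values.find? (fun sc => PySem.Str.isIn lowered (PySem.Str.lower (pvName sc))) with
        | some sc => pvItems sc
        | none => []  -- Python raises SystemExit here; excluded by Pre_

-- ===== PORT B =====
-- the single loop of Source B: returns on exact match, carries the first substring candidate
def pvAltLoop (lowered : String) (cand : Option (List (String × String))) :
    List (List (String × String)) → Option (List (String × String))
  | [] => cand
  | sc :: rest =>
    let name := PySem.Str.lower (pvName sc)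
    if name == lowered then some sc
    else pvAltLoop lowered (if cand.isNone && PySem.Str.isIn lowered name then some sc else cand) rest

def resolve_scene_alt (scenes : List (String × List (String × String))) (query : Option String) : List (String × String) :=
  let q := pvQuery query
  let d := PySem.Dict.ofList scenes
  match d.get? q with
  | some sc => pvItems sc
  | none =>
    match (match PySem.Int.ofStr? q with
           | some numeric => d.get? (PySem.Int.toStr numeric)
           | none => none) with
    | some sc => pvItems sc
    | none =>
      match pvAltLoop (PySem.Str.lower q) none d.values with
      | some sc => pvItems sc
      | none => []  -- raise SystemExit; excluded by Pre_

-- ===== PRECONDITION & SPEC =====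
-- Pre_ excludes exactly the inputs on which A (and B) raise SystemExit: the
-- (defaulted) query matches no key, no numeric key, and no scene name as a substring.
def Pre_resolve_scene (scenes : List (String × List (String × String))) (query : Option String) : Prop :=
  (let q := pvQuery query
   let d := PySem.Dict.ofList scenes
   (d.contains q
    || (match PySem.Int.ofStr? q with
        | some numeric => d.contains (PySem.Int.toStr numeric)
        | none => false)
    || d.values.any (fun sc => PySem.Str.isIn (PySem.Str.lower q) (PySem.Str.lower (pvName sc))))) = true
instance (scenes : List (String × List (String × String))) (query : Option String) : Decidable (Pre_resolve_scene scenes query) := by unfold Pre_resolve_scene; infer_instance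

def pvWitness_resolve_scene : (List (String × List (String × String))) × Option String :=
  ([("112", [("name", "Town")]), ("7", [("name", "Cave")])], none)

def Spec_resolve_scene (scenes : List (String × List (String × String))) (query : Option String) (out : List (String × String)) : Prop := out = resolve_scene_alt scenes query
instance (scenes : List (String × List (String × String))) (query : Option String) (out : List (String × String)) : Decidable (Spec_resolve_scene scenes query out) := by unfold Spec_resolve_scene; infer_instance

-- ===== CLAIM (what is proved, stated in full; the proofs are below) =====
def Claim_equal_resolve_scene : Prop := ∀ (scenes : List (String × List (String × String))) (query : Option String), Dom_resolve_scene scenes query → Pre_resolve_scene scenes query → Spec_resolve_scene scenes query (resolve_scene scenes query)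

-- ===== LEMMAS AND PROOFS =====

-- B's single loop equals A's two scans: an exact match anywhere wins; otherwise the
-- carried candidate; otherwise the first substring match of the remaining list.
theorem pvAltLoop_eq (lowered : String) (cand : Option (List (String × String)))
    (vs : List (List (String × String))) :
    pvAltLoop lowered cand vs =
      match vs.find? (fun sc => PySem.Str.lower (pvName sc) == lowered) with
      | some sc => some sc
      | none =>
        match cand with
        | some c => some c
        | none => vs.find? (fun sc => PySem.Str.isIn lowered (PySem.Str.lower (pvName sc))) := by
  induction vs generalizing cand with
  | nil => cases cand <;> simp [pvAltLoop]
  | cons sc rest ih =>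
    by_cases h : PySem.Str.lower (pvName sc) == lowered
    · simp [pvAltLoop, List.find?, h]
    · have hstep : pvAltLoop lowered cand (sc :: rest)
          = pvAltLoop lowered (if cand.isNone && PySem.Str.isIn lowered (PySem.Str.lower (pvName sc)) then some sc else cand) rest := by
        simp only [pvAltLoop]
        rw [if_neg (by simpa using h)]
      rw [hstep, ih]
      cases cand with
      | some c => simp [List.find?, h]
      | none =>
        cases hs : PySem.Chars.isIn lowered.toList (PySem.Chars.lower (pvName sc).toList) with
        | true => simp [List.find?, h, hs]
        | false => simp [List.find?, h, hs]

-- ===== VERDICT (by name: the statement is the Claim_ definition above) =====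
theorem resolve_scene_spec : Claim_equal_resolve_scene := by
  intro scenes query _ _
  show _ = _
  unfold resolve_scene resolve_scene_alt
  cases h1 : (PySem.Dict.ofList scenes).get? (pvQuery query) with
  | some sc => simp only [h1]
  | none =>
    simp only [h1]
    cases h2 : (match PySem.Int.ofStr? (pvQuery query) with
                | some numeric => (PySem.Dict.ofList scenes).get? (PySem.Int.toStr numeric)
                | none => none) with
    | some sc => simp only [h2]
    | none =>
      simp only [h2]
      rw [pvAltLoop_eq]
      cases h3 : (PySem.Dict.ofList scenes).values.find?
          (fun sc => PySem.Str.lower (pvName sc) == PySem.Str.lower (pvQuery query)) <;>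
        cases h4 : (PySem.Dict.ofList scenes).values.find?
            (fun sc => PySem.Str.isIn (PySem.Str.lower (pvQuery query)) (PySem.Str.lower (pvName sc))) <;>
          simp
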